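-- pv_equiv track=rewrite | github.com/ronksks/pdf-creator-elections | create_ktav_minui.py | reverse_slicing
-- ===== SOURCE A (Python) =====
-- def reverse_slicing(s):
--     if isinstance(s, str):
--         result = ""
--         non_digit_chars = ""
--         digit_chars = ""
--
--         for char in s:
--             if char.isdigit():
--                 if non_digit_chars:
--                     result = non_digit_chars[::-1] + result
--                     non_digit_chars = ""
--                 digit_chars += char
--             else:
--                 if digit_chars:
--                     result = digit_chars + result
--                     digit_chars = ""
--                 non_digit_chars += char
--
--         result = digit_chars + result
--         result = non_digit_chars[::-1] + result
--
--         return result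
--     return str(s)
-- ===== SOURCE B (Python) =====
-- def reverse_slicing(s):
--     if not isinstance(s, str):
--         return str(s)
--     # one pass: build the list of maximal digit/non-digit runs
--     runs = []  # list of [chars, is_digit]
--     for ch in s:
--         d = ch.isdigit()
--         if runs and runs[-1][1] == d:
--             runs[-1][0].append(ch)
--         else:
--             runs.append([[ch], d])
--     # emit runs in reverse order; non-digit runs reversed, digit runs kept
--     out = []
--     for chars, d in reversed(runs):
--         out.extend(chars if d else reversed(chars))
--     return ''.join(out)
-- ===== Notes on version B (the rewrite author's own statement) =====
-- stated objective: simpler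
-- what changed: B builds an explicit list of digit/non-digit runs in one pass and then joins them in reverse order (non-digit runs reversed), instead of A's two accumulator buffers flushed into a result string by repeated prepending.
import Mathlib
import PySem

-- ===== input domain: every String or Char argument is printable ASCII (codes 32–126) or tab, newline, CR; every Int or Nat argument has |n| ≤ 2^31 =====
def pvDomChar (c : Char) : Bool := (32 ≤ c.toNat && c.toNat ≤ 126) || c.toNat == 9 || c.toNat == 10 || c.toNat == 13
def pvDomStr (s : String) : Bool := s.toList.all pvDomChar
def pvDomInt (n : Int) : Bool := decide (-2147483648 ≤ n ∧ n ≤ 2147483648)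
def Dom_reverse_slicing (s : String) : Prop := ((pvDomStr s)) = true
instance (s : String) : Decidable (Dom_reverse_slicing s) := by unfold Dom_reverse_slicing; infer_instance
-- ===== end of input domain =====

-- B replaces A's two flush-on-switch accumulator buffers with an explicit run list
-- built in one pass and emitted in reverse order (objective: simpler decomposition).

-- ===== PORT A =====
-- A's loop state: (result, non_digit_chars, digit_chars), each a Python string ported as List Char.
def pvStepA (st : List Char × List Char × List Char) (c : Char) :
    List Char × List Char × List Char :=
  let (res, nd, dg) := st
  if PySem.Chars.isdigit c then
    if nd ≠ [] then (nd.reverse ++ res, [], dg ++ [c])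
    else (res, nd, dg ++ [c])
  else
    if dg ≠ [] then (dg ++ res, nd ++ [c], [])
    else (res, nd ++ [c], dg)

def reverse_slicing (s : String) : String :=
  let fin := s.toList.foldl pvStepA ([], [], [])
  -- result = digit_chars + result; result = non_digit_chars[::-1] + result
  String.mk (fin.2.1.reverse ++ (fin.2.2 ++ fin.1))

-- ===== PORT B =====
-- B's loop state: the run list, each run (chars, is_digit); runs[-1] mutation = dropLast ++ [updated last].
def pvStepB (runs : List (List Char × Bool)) (c : Char) : List (List Char × Bool) :=
  let d := PySem.Chars.isdigit c
  match runs.getLast? with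
  | some last => if last.2 = d then runs.dropLast ++ [(last.1 ++ [c], d)] else runs ++ [([c], d)]
  | none => [([c], d)]

def pvEmit (r : List Char × Bool) : List Char := if r.2 then r.1 else r.1.reverse

def reverse_slicing_alt (s : String) : String :=
  let runs := s.toList.foldl pvStepB []
  String.mk ((runs.reverse.map pvEmit).flatten)

-- ===== PRECONDITION & SPEC =====
def Spec_reverse_slicing (s : String) (out : String) : Prop := out = reverse_slicing_alt s
instance (s : String) (out : String) : Decidable (Spec_reverse_slicing s out) := by unfold Spec_reverse_slicing; infer_instance

-- ===== CLAIM (what is proved, stated in full; the proofs are below) =====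
def Claim_equal_reverse_slicing : Prop := ∀ (s : String), Dom_reverse_slicing s → Spec_reverse_slicing s (reverse_slicing s)

-- ===== LEMMAS AND PROOFS =====

def pvOutB (runs : List (List Char × Bool)) : List Char := (runs.reverse.map pvEmit).flatten

-- simulation relation between A's buffers and B's run list
def pvInv (st : List Char × List Char × List Char) (runs : List (List Char × Bool)) : Prop :=
  match runs.getLast? with
  | none => st.1 = [] ∧ st.2.1 = [] ∧ st.2.2 = []
  | some (cs, true)  => st.2.2 = cs ∧ cs ≠ [] ∧ st.2.1 = [] ∧ st.1 = pvOutB runs.dropLast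
  | some (cs, false) => st.2.1 = cs ∧ cs ≠ [] ∧ st.2.2 = [] ∧ st.1 = pvOutB runs.dropLast

theorem pvOutB_append_one (l : List (List Char × Bool)) (r : List Char × Bool) :
    pvOutB (l ++ [r]) = pvEmit r ++ pvOutB l := by
  simp [pvOutB]

theorem pvInv_step (st : List Char × List Char × List Char) (runs : List (List Char × Bool))
    (h : pvInv st runs) (c : Char) : pvInv (pvStepA st c) (pvStepB runs c) := by
  obtain ⟨res, nd, dg⟩ := st
  unfold pvInv at h
  unfold pvStepA pvStepB
  cases hl : runs.getLast? with
  | none =>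
    rw [hl] at h
    obtain ⟨h1, h2, h3⟩ := h
    simp only at h1 h2 h3
    subst h1; subst h2; subst h3
    cases hd : PySem.Chars.isdigit c <;> simp [pvInv, hd, pvOutB]
  | some last =>
    obtain ⟨cs, b⟩ := last
    rw [hl] at h
    have hne : runs ≠ [] := by intro h0; simp [h0] at hl
    have hruns : runs = runs.dropLast ++ [(cs, b)] := by
      conv_lhs => rw [← List.dropLast_append_getLast hne]
      rw [List.getLast_eq_iff_getLast?_eq_some hne |>.mpr hl]
    cases b with
    | true =>
      obtain ⟨h1, h2, h3, h4⟩ := h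
      simp only at h1 h2 h3 h4
      subst h1; subst h3; subst h4
      cases hd : PySem.Chars.isdigit c with
      | true =>
        simp only [hd, if_pos rfl, ne_eq, not_true_eq_false, if_false, reduceIte]
        rw [hruns]
        simp [pvInv, h2]
      | false =>
        simp only [hd, Bool.true_eq_false, reduceIte, ne_eq, h2, not_false_eq_true, if_true]
        unfold pvInv
        rw [List.getLast?_concat, List.dropLast_concat]
        refine ⟨rfl, by simp, rfl, ?_⟩
        conv_rhs => rw [hruns]
        rw [pvOutB_append_one]
        simp [pvEmit]
    | false =>
      obtain ⟨h1, h2, h3, h4⟩ := h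
      simp only at h1 h2 h3 h4
      subst h1; subst h3; subst h4
      cases hd : PySem.Chars.isdigit c with
      | true =>
        simp only [hd, Bool.false_eq_true, reduceIte, ne_eq, h2, not_false_eq_true, if_true]
        unfold pvInv
        rw [List.getLast?_concat, List.dropLast_concat]
        refine ⟨rfl, by simp, rfl, ?_⟩
        conv_rhs => rw [hruns]
        rw [pvOutB_append_one]
        simp [pvEmit]
      | false =>
        simp only [hd, if_pos rfl, ne_eq, not_true_eq_false, if_false, reduceIte]
        rw [hruns]
        simp [pvInv, h2]

theorem pvInv_foldl (l : List Char) (st : List Char × List Char × List Char)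
    (runs : List (List Char × Bool)) (h : pvInv st runs) :
    pvInv (l.foldl pvStepA st) (l.foldl pvStepB runs) := by
  induction l generalizing st runs with
  | nil => exact h
  | cons c l ih => exact ih _ _ (pvInv_step _ _ h c)

theorem pvInv_out (st : List Char × List Char × List Char) (runs : List (List Char × Bool))
    (h : pvInv st runs) : st.2.1.reverse ++ (st.2.2 ++ st.1) = pvOutB runs := by
  obtain ⟨res, nd, dg⟩ := st
  unfold pvInv at h
  cases hl : runs.getLast? with
  | none =>
    rw [hl] at h
    obtain ⟨h1, h2, h3⟩ := h
    simp only at h1 h2 h3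
    have : runs = [] := by
      cases runs with
      | nil => rfl
      | cons x xs => simp [List.getLast?_concat, List.getLast?] at hl
    simp [h1, h2, h3, this, pvOutB]
  | some last =>
    obtain ⟨cs, b⟩ := last
    rw [hl] at h
    have hne : runs ≠ [] := by intro h0; simp [h0] at hl
    have hruns : runs = runs.dropLast ++ [(cs, b)] := by
      conv_lhs => rw [← List.dropLast_append_getLast hne]
      rw [List.getLast_eq_iff_getLast?_eq_some hne |>.mpr hl]
    cases b with
    | true =>
      obtain ⟨h1, _, h3, h4⟩ := h
      simp only at h1 h3 h4
      rw [hruns, pvOutB_append_one]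
      simp [h1, h3, h4, pvEmit]
    | false =>
      obtain ⟨h1, _, h3, h4⟩ := h
      simp only at h1 h3 h4
      rw [hruns, pvOutB_append_one]
      simp [h1, h3, h4, pvEmit]

-- ===== VERDICT (by name: the statement is the Claim_ definition above) =====
theorem reverse_slicing_spec : Claim_equal_reverse_slicing := by
  intro s _
  unfold Spec_reverse_slicing reverse_slicing reverse_slicing_alt
  have h := pvInv_foldl s.toList ([], [], []) [] (by simp [pvInv])
  have := pvInv_out _ _ h
  simp only [pvOutB] at this
  exact congrArg String.mk this
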